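-- pv_equiv track=rewrite | github.com/releventhal/ep2_luana_e_renata | funcoes.py | calcula_pontos_full_house
-- ===== SOURCE A (Python) =====
-- def calcula_pontos_full_house(dados):
--     contagem = {}
--
--     for n in dados:
--         if n in contagem:
--             contagem[n] += 1
--         else:
--             contagem[n] = 1
--
--     tres_iguais = False
--     dois_iguais = False
--
--     for iguais in contagem.values():
--         if iguais == 3:
--             tres_iguais = True
--         elif iguais == 2:
--             dois_iguais = True
--
--     if tres_iguais and dois_iguais:
--         soma = 0
--         for n in dados:
--             soma += n
--         return soma
--     else:
--         return 0
-- ===== SOURCE B (Python) =====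
-- def calcula_pontos_full_house(dados):
--     ordenado = sorted(dados)
--     tres = False
--     dois = False
--     run = 0
--     prev = None
--     for v in ordenado:
--         if prev is not None and v == prev:
--             run += 1
--         else:
--             if run == 3:
--                 tres = True
--             elif run == 2:
--                 dois = True
--             run = 1
--             prev = v
--     if run == 3:
--         tres = True
--     elif run == 2:
--         dois = True
--     if tres and dois:
--         return sum(dados)
--     return 0
-- ===== Notes on version B (the rewrite author's own statement) =====
-- stated objective: alternative
-- what changed: Replaces A's frequency dict plus a flag pass over its values by sorting a copy of the dice and doing a single run-length scan of the sorted list, setting the triple/pair flags from run lengths.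
import Mathlib
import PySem

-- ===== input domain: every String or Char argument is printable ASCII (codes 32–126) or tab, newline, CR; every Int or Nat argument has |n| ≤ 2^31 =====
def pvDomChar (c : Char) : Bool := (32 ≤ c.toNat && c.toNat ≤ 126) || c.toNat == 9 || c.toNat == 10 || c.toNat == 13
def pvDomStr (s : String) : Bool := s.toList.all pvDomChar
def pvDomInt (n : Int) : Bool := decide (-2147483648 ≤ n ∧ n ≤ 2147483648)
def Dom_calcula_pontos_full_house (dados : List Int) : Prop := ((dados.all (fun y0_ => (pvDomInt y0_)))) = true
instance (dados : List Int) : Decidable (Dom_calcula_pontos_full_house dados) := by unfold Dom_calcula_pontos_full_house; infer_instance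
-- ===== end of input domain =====

-- B sorts a copy of the dice and sets the triple/pair flags by a run-length scan of the sorted list, instead of A's frequency dict; alternative decomposition, not faster.


-- ===== PORT A =====
def calcula_pontos_full_house (dados : List Int) : Int :=
  let contagem := dados.foldl (fun (d : PySem.Dict Int Int) n =>
    match PySem.Dict.get? d n with
    | some c => PySem.Dict.insert d n (c + 1)
    | none   => PySem.Dict.insert d n 1) PySem.Dict.empty
  let flags := (PySem.Dict.values contagem).foldl
    (fun (p : Bool × Bool) iguais =>
      if iguais == 3 then (true, p.2)
      else if iguais == 2 then (p.1, true)
      else p) (false, false)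
  if flags.1 && flags.2 then dados.foldl (fun soma n => soma + n) 0 else 0

-- ===== PORT B =====
-- the 'if run == 3: tres = True elif run == 2: dois = True' flag update of Source B
def fhFlags (tres dois : Bool) (run : Int) : Bool × Bool :=
  if run == 3 then (true, dois)
  else if run == 2 then (tres, true)
  else (tres, dois)

-- the loop body of Source B's scan over the sorted list: state (tres, dois, run, prev)
def fhStep (st : Bool × Bool × Int × Option Int) (v : Int) : Bool × Bool × Int × Option Int :=
  if st.2.2.2 == some v then (st.1, st.2.1, st.2.2.1 + 1, st.2.2.2)
  else
    let f := fhFlags st.1 st.2.1 st.2.2.1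
    (f.1, f.2, 1, some v)

def calcula_pontos_full_house_alt (dados : List Int) : Int :=
  let ordenado := PySem.List.sorted dados (fun x => x) false
  let s := ordenado.foldl fhStep (false, false, 0, none)
  let f := fhFlags s.1 s.2.1 s.2.2.1
  if f.1 && f.2 then dados.sum else 0

-- ===== PRECONDITION & SPEC =====
def Spec_calcula_pontos_full_house (dados : List Int) (out : Int) : Prop := out = calcula_pontos_full_house_alt dados
instance (dados : List Int) (out : Int) : Decidable (Spec_calcula_pontos_full_house dados out) := by unfold Spec_calcula_pontos_full_house; infer_instance

-- ===== CLAIM (what is proved, stated in full; the proofs are below) =====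
def Claim_equal_calcula_pontos_full_house : Prop := ∀ (dados : List Int), Dom_calcula_pontos_full_house dados → Spec_calcula_pontos_full_house dados (calcula_pontos_full_house dados)

-- ===== LEMMAS AND PROOFS =====

-- each step of A's counting loop is the insert-spelled counter step
theorem countStep_foldl (l : List Int) (d : PySem.Dict Int Int) :
    l.foldl (fun (d : PySem.Dict Int Int) n =>
      match PySem.Dict.get? d n with
      | some c => PySem.Dict.insert d n (c + 1)
      | none   => PySem.Dict.insert d n 1) d
    = l.foldl (fun d x => PySem.Dict.insert d x (PySem.Dict.getD d x 0 + 1)) d := by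
  induction l generalizing d with
  | nil => rfl
  | cons x xs ih =>
    have hstep : (match PySem.Dict.get? d x with
        | some c => PySem.Dict.insert d x (c + 1)
        | none   => PySem.Dict.insert d x 1)
        = PySem.Dict.insert d x (PySem.Dict.getD d x 0 + 1) := by
      cases h : PySem.Dict.get? d x <;> simp [PySem.Dict.getD, h]
    rw [List.foldl_cons, List.foldl_cons, hstep, ih]

-- A's counting loop builds exactly Counter(dados)
theorem countLoop_eq_counter (dados : List Int) :
    dados.foldl (fun (d : PySem.Dict Int Int) n =>
      match PySem.Dict.get? d n with
      | some c => PySem.Dict.insert d n (c + 1)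
      | none   => PySem.Dict.insert d n 1) PySem.Dict.empty
    = PySem.Dict.counter dados := by
  rw [countStep_foldl, PySem.Dict.foldl_insert_getD_add_one_eq_counter]

-- A's flag loop computes two membership tests
theorem flagLoop_eq (l : List Int) (a b : Bool) :
    l.foldl (fun (p : Bool × Bool) iguais =>
      if iguais == 3 then (true, p.2)
      else if iguais == 2 then (p.1, true)
      else p) (a, b)
    = (a || decide ((3:Int) ∈ l), b || decide ((2:Int) ∈ l)) := by
  induction l generalizing a b with
  | nil => simp
  | cons x xs ih =>
    rw [List.foldl_cons]
    by_cases h3 : x = 3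
    · subst h3
      show List.foldl _ (true, b) xs = _
      rw [ih]; simp
    · by_cases h2 : x = 2
      · subst h2
        show List.foldl _ (a, true) xs = _
        rw [ih]; simp
      · rw [if_neg (by simp [h3]), if_neg (by simp [h2]), ih]
        simp [Ne.symm h3, Ne.symm h2]

theorem mem_values_counter (dados : List Int) (k : Nat) :
    ((k:Int) ∈ PySem.Dict.values (PySem.Dict.counter dados))
      ↔ ∃ x ∈ dados, dados.count x = k := by
  simp only [PySem.Dict.values, PySem.Dict.items_counter, List.map_map,
    List.mem_map, Function.comp]
  constructor
  · rintro ⟨x, hx, hk⟩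
    exact ⟨x, (PySem.Set.mem_ofList dados x).1 hx, by exact_mod_cast hk⟩
  · rintro ⟨x, hx, hk⟩
    exact ⟨x, (PySem.Set.mem_ofList dados x).2 hx, by exact_mod_cast hk⟩

theorem fhFlags_eq (t d : Bool) (r : Int) :
    fhFlags t d r = (t || decide (r = 3), d || decide (r = 2)) := by
  unfold fhFlags
  by_cases h3 : r = 3
  · subst h3; simp
  · by_cases h2 : r = 2
    · subst h2; simp
    · simp [h3, h2]

-- merging the flag disjunctions: ((t || p) || n) || e' = (t || q) || e when q ↔ p and (n ∨ e') ↔ e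
theorem flag_merge (t : Bool) {p n e' q e : Prop}
    [Decidable p] [Decidable n] [Decidable e'] [Decidable q] [Decidable e]
    (hq : q ↔ p) (he : (n ∨ e') ↔ e) :
    (((t || decide p) || decide n) || decide e') = ((t || decide q) || decide e) := by
  rw [decide_eq_decide.2 hq.symm] at *
  rw [Bool.or_assoc (t || decide q), ← Bool.decide_or _ _, decide_eq_decide.2 he]

theorem flag_merge0 {n e' e : Prop} [Decidable n] [Decidable e'] [Decidable e]
    (he : (n ∨ e') ↔ e) :
    ((false || decide n) || decide e') = decide e := by
  rw [Bool.false_or, ← Bool.decide_or _ _, decide_eq_decide.2 he]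

-- congruence for the three-way Bool disjunctions the flags reduce to
theorem or3_congr (t : Bool) {p q p' q' : Prop}
    [Decidable p] [Decidable q] [Decidable p'] [Decidable q']
    (hp : p ↔ p') (hq : q ↔ q') :
    (t || decide p || decide q) = (t || decide p' || decide q') := by
  rw [decide_eq_decide.2 hp, decide_eq_decide.2 hq]

-- the scan invariant: from state (t, d, r, some a) over a sorted list whose
-- elements are all ≥ a, the resulting flags read "r + count of a reaches 3/2"
-- plus "some later (≠ a) value has count 3/2"
theorem scan_invariant (l : List Int) (hs : l.Pairwise (· ≤ ·)) :
    ∀ (a : Int) (t d : Bool) (r : Int), (∀ x ∈ l, a ≤ x) →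
    (let s := l.foldl fhStep (t, d, r, some a)
     fhFlags s.1 s.2.1 s.2.2.1)
    = (t || decide (r + l.count a = 3) || decide (∃ x ∈ l, x ≠ a ∧ l.count x = 3),
       d || decide (r + l.count a = 2) || decide (∃ x ∈ l, x ≠ a ∧ l.count x = 2)) := by
  induction l with
  | nil =>
    intro a t d r _
    simp [fhFlags_eq]
  | cons v l2 ih =>
    intro a t d r hle
    have htail : l2.Pairwise (· ≤ ·) := hs.tail
    have hvle : ∀ x ∈ l2, v ≤ x := fun x hx => (List.pairwise_cons.1 hs).1 x hx
    by_cases hva : v = a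
    · subst hva
      have h1 : fhStep (t, d, r, some v) v = (t, d, r + 1, some v) := by
        simp [fhStep]
      rw [List.foldl_cons, h1, ih htail v t d (r + 1) hvle]
      have hex : ∀ k : Nat, (∃ x ∈ l2, x ≠ v ∧ l2.count x = k)
          ↔ (∃ x ∈ v :: l2, x ≠ v ∧ (v :: l2).count x = k) := by
        intro k
        constructor
        · rintro ⟨x, hx, hxv, hk⟩
          exact ⟨x, List.mem_cons_of_mem _ hx, hxv,
            by rwa [List.count_cons_of_ne (Ne.symm hxv)]⟩
        · rintro ⟨x, hx, hxv, hk⟩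
          rcases List.mem_cons.1 hx with h | h
          · exact absurd h hxv
          · exact ⟨x, h, hxv, by rwa [List.count_cons_of_ne (Ne.symm hxv)] at hk⟩
      have hnum : ∀ k : Int, (r + 1 + (l2.count v : Int) = k)
          ↔ (r + ((v :: l2).count v : Int) = k) := by
        intro k
        rw [List.count_cons_self]
        push_cast
        constructor <;> intro <;> omega
      exact Prod.ext (or3_congr t (hnum 3) (hex 3)) (or3_congr d (hnum 2) (hex 2))
    · -- v ≠ a, hence a < v and a does not occur in v :: l2
      have hav : a < v := lt_of_le_of_ne (hle v (List.mem_cons_self)) (Ne.symm hva)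
      have hnot : ∀ x ∈ v :: l2, x ≠ a := by
        intro x hx
        rcases List.mem_cons.1 hx with h | h
        · subst h; exact hva
        · exact ne_of_gt (lt_of_lt_of_le hav (hvle x h))
      have hcnt : (v :: l2).count a = 0 := by
        rw [List.count_eq_zero]
        intro hmem
        exact hnot a hmem rfl
      have h1 : fhStep (t, d, r, some a) v
          = (t || decide (r = 3), d || decide (r = 2), 1, some v) := by
        simp [fhStep, Ne.symm hva, fhFlags_eq]
      rw [List.foldl_cons, h1,
        ih htail v (t || decide (r = 3)) (d || decide (r = 2)) 1 hvle, hcnt]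
      have hvcnt : ((v :: l2).count v : Int) = 1 + (l2.count v : Int) := by
        rw [List.count_cons_self]; push_cast; ring
      have hex : ∀ k : Nat, ((1 + (l2.count v : Int) = (k : Int)) ∨ ∃ x ∈ l2, x ≠ v ∧ l2.count x = k)
          ↔ (∃ x ∈ v :: l2, x ≠ a ∧ (v :: l2).count x = k) := by
        intro k
        constructor
        · rintro (h | ⟨x, hx, hxv, hk⟩)
          · refine ⟨v, List.mem_cons_self, hva, ?_⟩
            have hv2 : ((v :: l2).count v : Int) = (k : Int) := hvcnt.trans h
            exact_mod_cast hv2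
          · exact ⟨x, List.mem_cons_of_mem _ hx,
              hnot x (List.mem_cons_of_mem _ hx),
              by rwa [List.count_cons_of_ne (Ne.symm hxv)]⟩
        · rintro ⟨x, hx, _, hk⟩
          by_cases hxv : x = v
          · subst hxv
            left
            rw [← hvcnt]
            exact_mod_cast hk
          · right
            rcases List.mem_cons.1 hx with h | h
            · exact absurd h hxv
            · exact ⟨x, h, hxv, by rwa [List.count_cons_of_ne (Ne.symm hxv)] at hk⟩
      have hex3 : (1 + (l2.count v : Int) = 3 ∨ ∃ x ∈ l2, x ≠ v ∧ l2.count x = 3)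
          ↔ ∃ x ∈ v :: l2, x ≠ a ∧ (v :: l2).count x = 3 := by exact_mod_cast hex 3
      have hex2 : (1 + (l2.count v : Int) = 2 ∨ ∃ x ∈ l2, x ≠ v ∧ l2.count x = 2)
          ↔ ∃ x ∈ v :: l2, x ≠ a ∧ (v :: l2).count x = 2 := by exact_mod_cast hex 2
      have hr3 : (r + ((0:Nat):Int) = 3) ↔ r = 3 := by push_cast; constructor <;> intro <;> omega
      have hr2 : (r + ((0:Nat):Int) = 2) ↔ r = 2 := by push_cast; constructor <;> intro <;> omega
      exact Prod.ext (flag_merge t hr3 hex3) (flag_merge d hr2 hex2)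

-- the whole scan of a sorted list computes the two "some value has count 3/2" flags
theorem scan_sorted (l : List Int) (hs : l.Pairwise (· ≤ ·)) :
    (let s := l.foldl fhStep (false, false, 0, none)
     fhFlags s.1 s.2.1 s.2.2.1)
    = (decide (∃ x ∈ l, l.count x = 3), decide (∃ x ∈ l, l.count x = 2)) := by
  cases l with
  | nil => simp [fhFlags]
  | cons v l2 =>
    have htail : l2.Pairwise (· ≤ ·) := hs.tail
    have hvle : ∀ x ∈ l2, v ≤ x := fun x hx => (List.pairwise_cons.1 hs).1 x hx
    have h1 : fhStep (false, false, 0, none) v = (false, false, 1, some v) := by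
      simp [fhStep, fhFlags]
    have hvcnt : ((v :: l2).count v : Int) = 1 + (l2.count v : Int) := by
      rw [List.count_cons_self]; push_cast; ring
    have hex : ∀ k : Nat, ((1 + (l2.count v : Int) = (k : Int)) ∨ ∃ x ∈ l2, x ≠ v ∧ l2.count x = k)
        ↔ (∃ x ∈ v :: l2, (v :: l2).count x = k) := by
      intro k
      constructor
      · rintro (h | ⟨x, hx, hxv, hk⟩)
        · refine ⟨v, List.mem_cons_self, ?_⟩
          have hv2 : ((v :: l2).count v : Int) = (k : Int) := hvcnt.trans h
          exact_mod_cast hv2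
        · exact ⟨x, List.mem_cons_of_mem _ hx,
            by rwa [List.count_cons_of_ne (Ne.symm hxv)]⟩
      · rintro ⟨x, hx, hk⟩
        by_cases hxv : x = v
        · subst hxv
          left
          rw [← hvcnt]
          exact_mod_cast hk
        · right
          rcases List.mem_cons.1 hx with h | h
          · exact absurd h hxv
          · exact ⟨x, h, hxv, by rwa [List.count_cons_of_ne (Ne.symm hxv)] at hk⟩
    show (let s := List.foldl fhStep (fhStep (false, false, 0, none) v) l2
          fhFlags s.1 s.2.1 s.2.2.1) = _
    rw [h1, scan_invariant l2 htail v false false 1 hvle]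
    have hex3 : (1 + (l2.count v : Int) = 3 ∨ ∃ x ∈ l2, x ≠ v ∧ l2.count x = 3)
        ↔ ∃ x ∈ v :: l2, (v :: l2).count x = 3 := by exact_mod_cast hex 3
    have hex2 : (1 + (l2.count v : Int) = 2 ∨ ∃ x ∈ l2, x ≠ v ∧ l2.count x = 2)
        ↔ ∃ x ∈ v :: l2, (v :: l2).count x = 2 := by exact_mod_cast hex 2
    exact Prod.ext (flag_merge0 hex3) (flag_merge0 hex2)

-- counts/membership survive the sort
theorem exists_count_sorted (dados : List Int) (k : Nat) :
    (∃ x ∈ PySem.List.sorted dados (fun x => x) false,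
        (PySem.List.sorted dados (fun x => x) false).count x = k)
    ↔ ∃ x ∈ dados, dados.count x = k := by
  have hp : (PySem.List.sorted dados (fun x => x) false).Perm dados :=
    PySem.List.sorted_perm dados (fun x => x) false
  constructor
  · rintro ⟨x, hx, hk⟩
    exact ⟨x, hp.mem_iff.1 hx, by rwa [hp.count_eq] at hk⟩
  · rintro ⟨x, hx, hk⟩
    exact ⟨x, hp.mem_iff.2 hx, by rwa [hp.count_eq]⟩

-- ===== VERDICT (by name: the statement is the Claim_ definition above) =====
theorem calcula_pontos_full_house_spec : Claim_equal_calcula_pontos_full_house := by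
  intro dados _
  unfold Spec_calcula_pontos_full_house calcula_pontos_full_house calcula_pontos_full_house_alt
  have hs : (PySem.List.sorted dados (fun x => x) false).Pairwise (· ≤ ·) := by
    simpa using PySem.List.sorted_pairwise dados (fun x => x)
  rw [countLoop_eq_counter]
  simp only [flagLoop_eq, Bool.false_or, scan_sorted _ hs,
    exists_count_sorted dados 3, exists_count_sorted dados 2, List.sum_eq_foldl]
  have h3 : decide ((3:Int) ∈ PySem.Dict.values (PySem.Dict.counter dados))
      = decide (∃ x ∈ dados, dados.count x = 3) := by
    rw [decide_eq_decide]; exact_mod_cast mem_values_counter dados 3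
  have h2 : decide ((2:Int) ∈ PySem.Dict.values (PySem.Dict.counter dados))
      = decide (∃ x ∈ dados, dados.count x = 2) := by
    rw [decide_eq_decide]; exact_mod_cast mem_values_counter dados 2
  rw [h3, h2]
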